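-- pv_equiv track=rewrite | github.com/MahmoudKebbi/programmable-matter-RL-2.0 | src/ai_agent.py | is_still_connected_after_move
-- ===== SOURCE A (Python) =====
-- from typing import List, Tuple, Optional, Dict, Set, Any
-- from collections import deque
--
-- DIRECTIONS = [(-1, 0), (1, 0), (0, -1), (0, 1), (-1, -1), (-1, 1), (1, -1), (1, 1)]
--
-- connectivity_cache = {}
--
-- def is_state_connected(state: List[Tuple[int, int]]) -> bool:
--     """Check if all blocks in the state are connected."""
--     state_tuple = tuple(sorted(state))
--
--     # Check cache first
--     if state_tuple in connectivity_cache: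
--         return connectivity_cache[state_tuple]
--
--     if not state:
--         return True
--
--     state_set = set(state)
--     visited = set()
--     queue = deque([state[0]])
--     visited.add(state[0])
--
--     while queue:
--         x, y = queue.popleft()
--         for dx, dy in DIRECTIONS:
--             neighbor = (x + dx, y + dy)
--             if neighbor in state_set and neighbor not in visited:
--                 visited.add(neighbor)
--                 queue.append(neighbor)
--
--     result = len(visited) == len(state)
--     connectivity_cache[state_tuple] = result
--     return result
--
-- def is_still_connected_after_move(
--     state: List[Tuple[int, int]], block_idx: int, new_pos: Tuple[int, int]
-- ) -> bool:
--     """Check if state remains connected after moving a single block."""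
--     if len(state) <= 1:
--         return True
--
--     state_set = set(state)
--     orig_pos = state[block_idx]
--
--     # If the block has no connections, it can't be moved (except for single block puzzles)
--     has_connections = False
--     for dx, dy in DIRECTIONS:
--         neighbor = (orig_pos[0] + dx, orig_pos[1] + dy)
--         if neighbor in state_set:
--             has_connections = True
--             break
--
--     if not has_connections and len(state) > 1:
--         return False
--
--     # Check if new position will be connected to at least one existing block
--     x, y = new_pos
--     will_be_connected = False
--     for dx, dy in DIRECTIONS:
--         neighbor = (x + dx, y + dy)
--         if neighbor in state_set and neighbor != orig_pos:
--             will_be_connected = True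
--             break
--
--     if not will_be_connected and len(state) > 1:
--         return False
--
--     # Full connectivity check
--     new_state = state.copy()
--     new_state[block_idx] = new_pos
--     return is_state_connected(new_state)
-- ===== SOURCE B (Python) =====
-- from typing import List, Tuple
--
-- DIRECTIONS = [(-1, 0), (1, 0), (0, -1), (0, 1), (-1, -1), (-1, 1), (1, -1), (1, 1)]
--
-- connectivity_cache = {}
--
--
-- def _neighbors(p):
--     return [(p[0] + dx, p[1] + dy) for dx, dy in DIRECTIONS]
--
--
-- def _connected_by_saturation(state):
--     """Connectivity via fixed-point saturation: grow the component of state[0]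
--     by whole passes over the block list until nothing changes (no BFS queue)."""
--     key = tuple(sorted(state))
--     if key in connectivity_cache:
--         return connectivity_cache[key]
--     if not state:
--         return True
--     comp = {state[0]}
--     changed = True
--     while changed:
--         changed = False
--         for c in state:
--             if c not in comp and any(n in comp for n in _neighbors(c)):
--                 comp.add(c)
--                 changed = True
--     result = len(comp) == len(state)
--     connectivity_cache[key] = result
--     return result
--
--
-- def is_still_connected_after_move(
--     state: List[Tuple[int, int]], block_idx: int, new_pos: Tuple[int, int]
-- ) -> bool:
--     if len(state) <= 1:
--         return True
--     cells = set(state)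
--     orig_pos = state[block_idx]
--     if not any(n in cells for n in _neighbors(orig_pos)):
--         return False
--     if not any(n in cells and n != orig_pos for n in _neighbors(new_pos)):
--         return False
--     new_state = state.copy()
--     new_state[block_idx] = new_pos
--     return _connected_by_saturation(new_state)
-- ===== Notes on version B (the rewrite author's own statement) =====
-- stated objective: alternative
-- what changed: The BFS connectivity check (deque frontier + visited set) is replaced by fixed-point saturation: grow the component of state[0] by whole passes over the block list until a pass adds nothing; the two neighbor guards are written via a neighbors helper with any().
import Mathlib
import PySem

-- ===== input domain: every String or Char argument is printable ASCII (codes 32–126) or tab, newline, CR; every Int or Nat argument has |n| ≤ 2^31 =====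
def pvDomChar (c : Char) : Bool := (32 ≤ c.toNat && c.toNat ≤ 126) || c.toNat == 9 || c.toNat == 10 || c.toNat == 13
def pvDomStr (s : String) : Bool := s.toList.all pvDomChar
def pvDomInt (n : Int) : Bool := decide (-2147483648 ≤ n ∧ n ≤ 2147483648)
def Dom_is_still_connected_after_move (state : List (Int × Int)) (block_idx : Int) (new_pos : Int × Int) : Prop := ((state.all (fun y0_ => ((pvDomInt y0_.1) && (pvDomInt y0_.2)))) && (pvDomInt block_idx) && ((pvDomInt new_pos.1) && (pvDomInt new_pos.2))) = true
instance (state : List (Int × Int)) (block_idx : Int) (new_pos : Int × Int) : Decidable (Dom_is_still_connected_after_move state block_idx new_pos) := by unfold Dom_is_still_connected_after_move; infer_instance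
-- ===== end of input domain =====

-- B replaces A's BFS connectivity check (deque frontier + visited set) by fixed-point
-- saturation (whole passes over the block list until a pass adds nothing) — objective:
-- alternative.  Equivalence is about the RETURN value only: A memoizes results in a
-- global connectivity_cache (a pure cache of this function's own result, so the value
-- is unchanged); the ports omit the cache.

-- ===== PORT A =====
def DIRECTIONS : List (Int × Int) := [(-1, 0), (1, 0), (0, -1), (0, 1), (-1, -1), (-1, 1), (1, -1), (1, 1)]

-- one BFS body step for a single direction d (neighbor test + visit + enqueue)
def bfsStep (S : PySem.Set (Int × Int)) (x y : Int)
    (vq : PySem.Set (Int × Int) × List (Int × Int)) (d : Int × Int) :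
    PySem.Set (Int × Int) × List (Int × Int) :=
  let nb := (x + d.1, y + d.2)
  if PySem.Set.contains S nb && !(PySem.Set.contains vq.1 nb) then
    (PySem.Set.add vq.1 nb, vq.2 ++ [nb])
  else vq

-- the 'while queue:' loop; fuel = number of pops, bounded by the number of distinct
-- blocks (each pop was enqueued once, enqueues only happen on fresh visits)
def bfs (S : PySem.Set (Int × Int)) :
    Nat → PySem.Set (Int × Int) → List (Int × Int) → PySem.Set (Int × Int)
  | _, visited, [] => visited
  | 0, visited, _ :: _ => visited
  | fuel + 1, visited, (x, y) :: qs =>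
      let vq := DIRECTIONS.foldl (bfsStep S x y) (visited, qs)
      bfs S fuel vq.1 vq.2

def is_state_connected (state : List (Int × Int)) : Bool :=
  match state with
  | [] => true
  | s0 :: _ =>
      let S := PySem.Set.ofList state
      let visited := bfs S state.length (PySem.Set.add PySem.Set.empty s0) [s0]
      visited.length == state.length

def is_still_connected_after_move (state : List (Int × Int)) (block_idx : Int) (new_pos : Int × Int) : Bool :=
  if state.length ≤ 1 then true
  else
    let state_set := PySem.Set.ofList state
    match PySem.List.pyGet? state block_idx with
    | none => false  -- IndexError; excluded by Pre_
    | some orig_pos =>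
      let has_connections := DIRECTIONS.any (fun d =>
        PySem.Set.contains state_set (orig_pos.1 + d.1, orig_pos.2 + d.2))
      if !has_connections && decide (1 < state.length) then false
      else
        let will_be_connected := DIRECTIONS.any (fun d =>
          PySem.Set.contains state_set (new_pos.1 + d.1, new_pos.2 + d.2) &&
            ((new_pos.1 + d.1, new_pos.2 + d.2) != orig_pos))
        if !will_be_connected && decide (1 < state.length) then false
        else is_state_connected (PySem.List.pySetD state block_idx new_pos)

-- ===== PORT B =====
def nbrs (p : Int × Int) : List (Int × Int) :=
  DIRECTIONS.map (fun d => (p.1 + d.1, p.2 + d.2))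

-- one whole 'for c in state' pass: add every block adjacent to the component
def satPass (state : List (Int × Int)) (cb : PySem.Set (Int × Int) × Bool) :
    PySem.Set (Int × Int) × Bool :=
  state.foldl (fun cb c =>
    if !(PySem.Set.contains cb.1 c) && (nbrs c).any (PySem.Set.contains cb.1) then
      (PySem.Set.add cb.1 c, true)
    else cb) cb

-- the 'while changed:' loop; fuel = number of passes, each non-final pass grows comp
def saturate (state : List (Int × Int)) :
    Nat → PySem.Set (Int × Int) → PySem.Set (Int × Int)
  | 0, comp => comp
  | fuel + 1, comp =>
      let cb := satPass state (comp, false)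
      if cb.2 then saturate state fuel cb.1 else cb.1

def is_state_connected_sat (state : List (Int × Int)) : Bool :=
  match state with
  | [] => true
  | s0 :: _ =>
      let comp := saturate state state.length (PySem.Set.add PySem.Set.empty s0)
      comp.length == state.length

def is_still_connected_after_move_alt (state : List (Int × Int)) (block_idx : Int) (new_pos : Int × Int) : Bool :=
  if state.length ≤ 1 then true
  else
    let cells := PySem.Set.ofList state
    match PySem.List.pyGet? state block_idx with
    | none => false  -- IndexError; excluded by Pre_
    | some orig_pos =>
      if !((nbrs orig_pos).any (PySem.Set.contains cells)) then false
      else if !((nbrs new_pos).any (fun n => PySem.Set.contains cells n && n != orig_pos)) then false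
      else is_state_connected_sat (PySem.List.pySetD state block_idx new_pos)

-- ===== PRECONDITION & SPEC =====
-- A raises IndexError on state[block_idx] when len(state) > 1 and block_idx is outside
-- [-len(state), len(state)); Pre_ excludes exactly those inputs (B raises there too).
def Pre_is_still_connected_after_move (state : List (Int × Int)) (block_idx : Int) (new_pos : Int × Int) : Prop :=
  state.length ≤ 1 ∨ (-(state.length : Int) ≤ block_idx ∧ block_idx < state.length)
instance (state : List (Int × Int)) (block_idx : Int) (new_pos : Int × Int) : Decidable (Pre_is_still_connected_after_move state block_idx new_pos) := by unfold Pre_is_still_connected_after_move; infer_instance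

def pvWitness_is_still_connected_after_move : (List (Int × Int)) × Int × (Int × Int) :=
  ([(0, 0), (0, 1)], 0, (1, 1))

def Spec_is_still_connected_after_move (state : List (Int × Int)) (block_idx : Int) (new_pos : Int × Int) (out : Bool) : Prop := out = is_still_connected_after_move_alt state block_idx new_pos
instance (state : List (Int × Int)) (block_idx : Int) (new_pos : Int × Int) (out : Bool) : Decidable (Spec_is_still_connected_after_move state block_idx new_pos out) := by unfold Spec_is_still_connected_after_move; infer_instance

-- ===== CLAIM (what is proved, stated in full; the proofs are below) =====
def Claim_equal_is_still_connected_after_move : Prop := ∀ (state : List (Int × Int)) (block_idx : Int) (new_pos : Int × Int), Dom_is_still_connected_after_move state block_idx new_pos → Pre_is_still_connected_after_move state block_idx new_pos → Spec_is_still_connected_after_move state block_idx new_pos (is_still_connected_after_move state block_idx new_pos)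

-- ===== LEMMAS AND PROOFS =====

-- positions reachable from s0 through chains of DIRECTIONS-adjacent members of state
inductive Reach (state : List (Int × Int)) (s0 : Int × Int) : (Int × Int) → Prop
  | base : Reach state s0 s0
  | step {p : Int × Int} (d : Int × Int) : Reach state s0 p → d ∈ DIRECTIONS →
      (p.1 + d.1, p.2 + d.2) ∈ state → Reach state s0 (p.1 + d.1, p.2 + d.2)

theorem dir_neg {d : Int × Int} (hd : d ∈ DIRECTIONS) : (-d.1, -d.2) ∈ DIRECTIONS := by
  fin_cases hd <;> decide

-- a step backwards along a direction is a Reach step too (DIRECTIONS is symmetric)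
theorem reach_back {state : List (Int × Int)} {s0 c : Int × Int} (d : Int × Int)
    (hd : d ∈ DIRECTIONS) (hr : Reach state s0 (c.1 + d.1, c.2 + d.2)) (hc : c ∈ state) :
    Reach state s0 c := by
  have h := Reach.step (state := state) (s0 := s0) (p := (c.1 + d.1, c.2 + d.2))
    (-d.1, -d.2) hr (dir_neg hd) (by simpa using hc)
  simpa using h

-- any list that contains s0, is sound for Reach and closed under adjacency has
-- membership = Reach (so any two such lists have the same members)
theorem mem_iff_reach {state : List (Int × Int)} {s0 : Int × Int} {R : List (Int × Int)}
    (h0 : s0 ∈ R)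
    (hsound : ∀ v ∈ R, Reach state s0 v)
    (hclosed : ∀ v ∈ R, ∀ d ∈ DIRECTIONS, (v.1 + d.1, v.2 + d.2) ∈ state → (v.1 + d.1, v.2 + d.2) ∈ R) :
    ∀ p, p ∈ R ↔ Reach state s0 p := by
  intro p
  constructor
  · exact hsound p
  · intro hr
    induction hr with
    | base => exact h0
    | step d hp hd hmem ih => exact hclosed _ ih d hd hmem

-- properties of one pop's fold over DIRECTIONS
theorem bfsFold_spec (state : List (Int × Int)) (x y : Int) :
    ∀ (ds : List (Int × Int)) (visited : PySem.Set (Int × Int)) (qs : List (Int × Int)),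
    visited.Nodup →
    (let vq := ds.foldl (bfsStep (PySem.Set.ofList state) x y) (visited, qs)
     (∀ v ∈ visited, v ∈ vq.1) ∧
     vq.1.Nodup ∧
     (∀ v ∈ vq.1, v ∈ visited ∨ (v ∈ state ∧ ∃ d ∈ ds, v = (x + d.1, y + d.2))) ∧
     (∀ q ∈ vq.2, q ∈ qs ∨ q ∈ vq.1) ∧
     (∀ q ∈ qs, q ∈ vq.2) ∧
     (∀ d ∈ ds, (x + d.1, y + d.2) ∈ state → (x + d.1, y + d.2) ∈ vq.1) ∧
     (∀ v ∈ vq.1, v ∈ visited ∨ v ∈ vq.2) ∧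
     vq.2.length + visited.toFinset.card = qs.length + vq.1.toFinset.card) := by
  intro ds
  induction ds with
  | nil =>
      intro visited qs hnd
      simp only [List.foldl_nil]
      refine ⟨fun v hv => hv, hnd, fun v hv => Or.inl hv, fun q hq => Or.inl hq,
        fun q hq => hq, by simp, fun v hv => Or.inl hv, trivial⟩
  | cons d ds ih =>
      intro visited qs hnd
      simp only [List.foldl_cons]
      by_cases hcond : (PySem.Set.contains (PySem.Set.ofList state) (x + d.1, y + d.2) &&
          !(PySem.Set.contains visited (x + d.1, y + d.2))) = true
      · -- the step fires: nb fresh, in state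
        have hnb_state : (x + d.1, y + d.2) ∈ state := by
          simp only [Bool.and_eq_true, PySem.Set.contains_iff, PySem.Set.mem_ofList] at hcond
          exact hcond.1
        have hnb_fresh : (x + d.1, y + d.2) ∉ visited := by
          simp only [Bool.and_eq_true, Bool.not_eq_true'] at hcond
          intro hmem
          have := (PySem.Set.contains_iff visited (x + d.1, y + d.2)).mpr hmem
          rw [this] at hcond; simp at hcond
        have hstep : bfsStep (PySem.Set.ofList state) x y (visited, qs) d =
            (PySem.Set.add visited (x + d.1, y + d.2), qs ++ [(x + d.1, y + d.2)]) := by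
          simp only [bfsStep, hcond, if_pos]
        rw [hstep]
        have hnd' : (PySem.Set.add visited (x + d.1, y + d.2)).Nodup :=
          PySem.Set.nodup_add _ _ hnd
        obtain ⟨ha, hb, hc, hd', he, hf, h8, hg⟩ := ih (PySem.Set.add visited (x + d.1, y + d.2))
          (qs ++ [(x + d.1, y + d.2)]) hnd'
        refine ⟨?_, hb, ?_, ?_, ?_, ?_, ?_, ?_⟩
        · intro v hv; exact ha v ((PySem.Set.mem_add _ _ _).mpr (Or.inl hv))
        · intro v hv
          rcases hc v hv with h | ⟨hs, dd, hdd, hveq⟩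
          · rcases (PySem.Set.mem_add _ _ _).mp h with h' | h'
            · exact Or.inl h'
            · exact Or.inr ⟨h' ▸ hnb_state, d, by simp, h'⟩
          · exact Or.inr ⟨hs, dd, List.mem_cons_of_mem _ hdd, hveq⟩
        · intro q hq
          rcases hd' q hq with h | h
          · rcases List.mem_append.mp h with h' | h'
            · exact Or.inl h'
            · simp only [List.mem_singleton] at h'
              exact Or.inr (ha _ (h' ▸ (PySem.Set.mem_add _ _ _).mpr (Or.inr rfl)))
          · exact Or.inr h
        · intro q hq; exact he q (List.mem_append.mpr (Or.inl hq))
        · intro dd hdd hs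
          rcases List.mem_cons.mp hdd with h | h
          · subst h; exact ha _ ((PySem.Set.mem_add _ _ _).mpr (Or.inr rfl))
          · exact hf dd h hs
        · intro v hv
          rcases h8 v hv with h | h
          · rcases (PySem.Set.mem_add _ _ _).mp h with h' | h'
            · exact Or.inl h'
            · exact Or.inr (h' ▸ he _ (List.mem_append.mpr (Or.inr (List.mem_singleton.mpr rfl))))
          · exact Or.inr h
        · have hcard : (PySem.Set.add visited (x + d.1, y + d.2)).toFinset.card =
              visited.toFinset.card + 1 := by
            rw [PySem.Set.add_of_not_mem hnb_fresh]
            simp [List.toFinset_append]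
            rw [Finset.card_insert_of_notMem (by simpa using hnb_fresh)]
          simp only [List.length_append, List.length_singleton] at hg ⊢
          omega
      · rw [Bool.not_eq_true] at hcond
        have hstep : bfsStep (PySem.Set.ofList state) x y (visited, qs) d = (visited, qs) := by
          unfold bfsStep
          rw [if_neg (by rw [Bool.eq_false_iff] at hcond; exact hcond)]
        rw [hstep]
        obtain ⟨ha, hb, hc, hd', he, hf, h8, hg⟩ := ih visited qs hnd
        refine ⟨ha, hb, fun v hv => (hc v hv).imp id (fun ⟨hs, dd, hdd, hveq⟩ =>
          ⟨hs, dd, List.mem_cons_of_mem _ hdd, hveq⟩), hd', he, ?_, h8, hg⟩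
        intro dd hdd hs
        rcases List.mem_cons.mp hdd with h | h
        · subst h
          have hS : PySem.Set.contains (PySem.Set.ofList state) (x + dd.1, y + dd.2) = true :=
            (PySem.Set.contains_iff _ _).mpr ((PySem.Set.mem_ofList _ _).mpr hs)
          have hmemv : (x + dd.1, y + dd.2) ∈ visited := by
            by_contra hnm
            have hfalse : PySem.Set.contains visited (x + dd.1, y + dd.2) = false := by
              rw [Bool.eq_false_iff]
              exact fun h => hnm ((PySem.Set.contains_iff _ _).mp h)
            rw [hS, hfalse] at hcond
            simp at hcond
          exact ha _ hmemv
        · exact hf dd h hs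
      
theorem bfs_spec (state : List (Int × Int)) (s0 : Int × Int) :
    ∀ (fuel : Nat) (visited : PySem.Set (Int × Int)) (queue : List (Int × Int)),
    visited.Nodup → s0 ∈ visited →
    (∀ v ∈ visited, v ∈ state) →
    (∀ v ∈ visited, Reach state s0 v) →
    (∀ q ∈ queue, q ∈ visited) →
    (∀ v ∈ visited, v ∉ queue → ∀ d ∈ DIRECTIONS, (v.1 + d.1, v.2 + d.2) ∈ state → (v.1 + d.1, v.2 + d.2) ∈ visited) →
    queue.length + state.toFinset.card ≤ fuel + visited.toFinset.card →
    (let R := bfs (PySem.Set.ofList state) fuel visited queue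
     R.Nodup ∧ s0 ∈ R ∧ (∀ v ∈ R, Reach state s0 v) ∧
     (∀ v ∈ R, ∀ d ∈ DIRECTIONS, (v.1 + d.1, v.2 + d.2) ∈ state → (v.1 + d.1, v.2 + d.2) ∈ R)) := by
  intro fuel
  induction fuel with
  | zero =>
      intro visited queue hnd h0 hsub hsound hq hcl hcount
      match queue with
      | [] => exact ⟨hnd, h0, hsound, fun v hv => hcl v hv (List.not_mem_nil)⟩
      | q :: qs =>
          exfalso
          have hsubF : visited.toFinset ⊆ state.toFinset :=
            fun a ha => List.mem_toFinset.mpr (hsub a (List.mem_toFinset.mp ha))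
          have hle := Finset.card_le_card hsubF
          simp only [List.length_cons] at hcount
          omega
  | succ fuel ih =>
      intro visited queue hnd h0 hsub hsound hq hcl hcount
      match queue with
      | [] => exact ⟨hnd, h0, hsound, fun v hv => hcl v hv (List.not_mem_nil)⟩
      | (x, y) :: qs =>
          obtain ⟨ha, hb, hc, hd', he, hf, h8, hg⟩ := bfsFold_spec state x y DIRECTIONS visited qs hnd
          show (let R := bfs (PySem.Set.ofList state) fuel
                  (DIRECTIONS.foldl (bfsStep (PySem.Set.ofList state) x y) (visited, qs)).1
                  (DIRECTIONS.foldl (bfsStep (PySem.Set.ofList state) x y) (visited, qs)).2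
                _ ∧ _ ∧ _ ∧ _)
          have hxy : (x, y) ∈ visited := hq _ (List.mem_cons_self)
          have hreach_xy : Reach state s0 (x, y) := hsound _ hxy
          apply ih _ _ hb (ha _ h0)
          · intro v hv
            rcases hc v hv with h | ⟨hs, _, _, _⟩
            · exact hsub v h
            · exact hs
          · intro v hv
            rcases hc v hv with h | ⟨hs, d, hd, hveq⟩
            · exact hsound v h
            · exact hveq ▸ Reach.step d hreach_xy hd (hveq ▸ hs)
          · intro q hqmem
            rcases hd' q hqmem with h | h
            · exact ha _ (hq _ (List.mem_cons_of_mem _ h))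
            · exact h
          · intro v hv hnq
            rcases h8 v hv with hvold | hvq
            · by_cases hvxy : v = (x, y)
              · subst hvxy
                intro d hd hs
                exact hf d hd hs
              · have hvnotq : v ∉ (x, y) :: qs := by
                  intro hmem
                  rcases List.mem_cons.mp hmem with h | h
                  · exact hvxy h
                  · exact hnq (he v h)
                intro d hd hs
                exact ha _ (hcl v hvold hvnotq d hd hs)
            · exact absurd hvq hnq
          · simp only [List.length_cons] at hcount
            omega

theorem satPass_fold (state : List (Int × Int)) (s0 : Int × Int) :
    ∀ (l : List (Int × Int)) (cb : PySem.Set (Int × Int) × Bool),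
    cb.1.Nodup →
    (let r := l.foldl (fun cb c =>
        if !(PySem.Set.contains cb.1 c) && (nbrs c).any (PySem.Set.contains cb.1) then
          (PySem.Set.add cb.1 c, true)
        else cb) cb
     (∀ v ∈ cb.1, v ∈ r.1) ∧
     r.1.Nodup ∧
     (∀ v ∈ r.1, v ∈ cb.1 ∨ v ∈ l) ∧
     (cb.2 = true → r.2 = true) ∧
     (r.2 = false → r.1 = cb.1 ∧ ∀ c ∈ l, c ∉ cb.1 → (nbrs c).any (PySem.Set.contains cb.1) = false) ∧
     ((∀ v ∈ cb.1, Reach state s0 v) → (∀ c ∈ l, c ∈ state) → ∀ v ∈ r.1, Reach state s0 v) ∧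
     cb.1.toFinset.card ≤ r.1.toFinset.card ∧
     (cb.2 = false → r.2 = true → cb.1.toFinset.card < r.1.toFinset.card)) := by
  intro l
  induction l with
  | nil =>
      intro cb hnd
      exact ⟨fun v hv => hv, hnd, fun v hv => Or.inl hv, fun h => h,
        fun _ => ⟨rfl, by simp⟩, fun hs _ => hs, le_refl _,
        fun h1 h2 => absurd (show cb.2 = true from h2) (by rw [h1]; simp)⟩
  | cons c l ih =>
      intro cb hnd
      simp only [List.foldl_cons]
      by_cases hcond : (!(PySem.Set.contains cb.1 c) && (nbrs c).any (PySem.Set.contains cb.1)) = true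
      · -- the pass adds c
        have hfresh : c ∉ cb.1 := by
          simp only [Bool.and_eq_true, Bool.not_eq_true'] at hcond
          intro hmem
          have := (PySem.Set.contains_iff cb.1 c).mpr hmem
          rw [this] at hcond
          simp at hcond
        have hany : (nbrs c).any (PySem.Set.contains cb.1) = true := by
          simp only [Bool.and_eq_true] at hcond
          exact hcond.2
        rw [if_pos hcond]
        have hnd' : (PySem.Set.add cb.1 c).Nodup := PySem.Set.nodup_add _ _ hnd
        obtain ⟨ha, hb, hc, hflag, hfalse, hsnd, hcard, hstrict⟩ :=
          ih (PySem.Set.add cb.1 c, true) hnd'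
        have hcardadd : (PySem.Set.add cb.1 c).toFinset.card = cb.1.toFinset.card + 1 := by
          rw [PySem.Set.add_of_not_mem hfresh]
          simp [List.toFinset_append]
          rw [Finset.card_insert_of_notMem (by simpa using hfresh)]
        have hfix : (List.toFinset ((PySem.Set.add cb.1 c, true).1 : List (Int × Int))).card =
            cb.1.toFinset.card + 1 := hcardadd
        refine ⟨?_, hb, ?_, fun _ => hflag rfl, ?_, ?_, by omega, fun _ _ => by omega⟩
        · intro v hv; exact ha _ ((PySem.Set.mem_add _ _ _).mpr (Or.inl hv))
        · intro v hv
          rcases hc v hv with h | h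
          · rcases (PySem.Set.mem_add _ _ _).mp h with h' | h'
            · exact Or.inl h'
            · exact Or.inr (h' ▸ List.mem_cons_self)
          · exact Or.inr (List.mem_cons_of_mem _ h)
        · intro hr2
          rw [hflag rfl] at hr2
          cases hr2
        · intro hsound hl v hv
          have hreach_c : Reach state s0 c := by
            obtain ⟨n, hn, hcn⟩ := List.any_eq_true.mp hany
            obtain ⟨d, hd, hnd_eq⟩ := List.mem_map.mp hn
            have hnmem : n ∈ cb.1 := (PySem.Set.contains_iff _ _).mp hcn
            have : Reach state s0 (c.1 + d.1, c.2 + d.2) := hnd_eq ▸ hsound n hnmem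
            exact reach_back d hd this (hl c List.mem_cons_self)
          refine hsnd ?_ (fun c' hc' => hl c' (List.mem_cons_of_mem _ hc')) v hv
          intro w hw
          rcases (PySem.Set.mem_add _ _ _).mp hw with h | h
          · exact hsound w h
          · exact h ▸ hreach_c
      · rw [Bool.not_eq_true] at hcond
        rw [if_neg (by rw [Bool.eq_false_iff] at hcond; exact hcond)]
        obtain ⟨ha, hb, hc, hflag, hfalse, hsnd, hcard, hstrict⟩ := ih cb hnd
        refine ⟨ha, hb, fun v hv => (hc v hv).imp id (List.mem_cons_of_mem _), hflag, ?_,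
          fun hsound hl => hsnd hsound (fun c' hc' => hl c' (List.mem_cons_of_mem _ hc')),
          hcard, hstrict⟩
        intro hr2
        obtain ⟨heq, hrest⟩ := hfalse hr2
        refine ⟨heq, ?_⟩
        intro c' hc' hnotin
        rcases List.mem_cons.mp hc' with h | h
        · subst h
          have hcontains_false : PySem.Set.contains cb.1 c' = false := by
            rw [Bool.eq_false_iff]
            exact fun hx => hnotin ((PySem.Set.contains_iff _ _).mp hx)
          rw [hcontains_false] at hcond
          simpa using hcond
        · exact hrest c' h hnotin

theorem saturate_spec (state : List (Int × Int)) (s0 : Int × Int) :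
    ∀ (fuel : Nat) (comp : PySem.Set (Int × Int)),
    comp.Nodup → s0 ∈ comp →
    (∀ v ∈ comp, v ∈ state) →
    (∀ v ∈ comp, Reach state s0 v) →
    state.toFinset.card < fuel + comp.toFinset.card →
    (let R := saturate state fuel comp
     R.Nodup ∧ s0 ∈ R ∧ (∀ v ∈ R, Reach state s0 v) ∧
     (∀ v ∈ R, ∀ d ∈ DIRECTIONS, (v.1 + d.1, v.2 + d.2) ∈ state → (v.1 + d.1, v.2 + d.2) ∈ R)) := by
  intro fuel
  induction fuel with
  | zero =>
      intro comp hnd h0 hsub hsound hcount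
      exfalso
      have hsubF : comp.toFinset ⊆ state.toFinset :=
        fun a ha => List.mem_toFinset.mpr (hsub a (List.mem_toFinset.mp ha))
      have := Finset.card_le_card hsubF
      omega
  | succ fuel ih =>
      intro comp hnd h0 hsub hsound hcount
      obtain ⟨ha, hb, hc, _, hfalse, hsnd, hcard, hstrict⟩ :=
        satPass_fold state s0 state (comp, false) hnd
      show (let R := (if (satPass state (comp, false)).2 then
              saturate state fuel (satPass state (comp, false)).1
            else (satPass state (comp, false)).1);
            R.Nodup ∧ s0 ∈ R ∧ (∀ v ∈ R, Reach state s0 v) ∧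
            (∀ v ∈ R, ∀ d ∈ DIRECTIONS, (v.1 + d.1, v.2 + d.2) ∈ state → (v.1 + d.1, v.2 + d.2) ∈ R))
      by_cases hr2 : (satPass state (comp, false)).2 = true
      · rw [if_pos hr2]
        have hlt : comp.toFinset.card < (satPass state (comp, false)).1.toFinset.card :=
          hstrict rfl hr2
        refine ih _ hb (ha s0 h0) ?_ ?_ (by omega)
        · intro v hv
          rcases hc v hv with h | h
          · exact hsub v h
          · exact h
        · exact hsnd hsound (fun c hc' => hc')
      · rw [if_neg hr2]
        rw [Bool.not_eq_true] at hr2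
        obtain ⟨heq, hclose⟩ := hfalse hr2
        show ((satPass state (comp, false)).1.Nodup ∧ _)
        simp only [satPass]
        rw [heq]
        refine ⟨hnd, h0, hsound, ?_⟩
        intro v hv d hd hs
        by_contra hnotin
        have hanyf := hclose _ hs hnotin
        rw [List.any_eq_false] at hanyf
        have hvmem : v ∈ nbrs (v.1 + d.1, v.2 + d.2) := by
          refine List.mem_map.mpr ⟨(-d.1, -d.2), dir_neg hd, ?_⟩
          have : (v.1 + d.1 + -d.1, v.2 + d.2 + -d.2) = v := by
            obtain ⟨v1, v2⟩ := v
            simp only [Prod.mk.injEq]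
            constructor <;> ring
          simp_all
        have hnp := hanyf v hvmem
        simp only [PySem.Set.contains_iff] at hnp
        exact hnp hv

theorem conn_eq (l : List (Int × Int)) : is_state_connected l = is_state_connected_sat l := by
  match l with
  | [] => rfl
  | s0 :: rest =>
    have hcardS := List.toFinset_card_le (s0 :: rest)
    have hcard1 : ([s0] : List (Int × Int)).toFinset.card = 1 := by simp
    obtain ⟨hnd1, h01, hsnd1, hcl1⟩ :=
      bfs_spec (s0 :: rest) s0 (s0 :: rest).length [s0] [s0]
        (by simp) (by simp) (by simp)
        (fun v hv => by
          rw [List.mem_singleton] at hv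
          exact hv ▸ Reach.base)
        (fun q hq => hq) (fun v hv hnq => absurd hv hnq)
        (by simp only [List.length_singleton, hcard1]; omega)
    obtain ⟨hnd2, h02, hsnd2, hcl2⟩ :=
      saturate_spec (s0 :: rest) s0 (s0 :: rest).length [s0]
        (by simp) (by simp) (by simp)
        (fun v hv => by
          rw [List.mem_singleton] at hv
          exact hv ▸ Reach.base)
        (by rw [hcard1]; omega)
    have hmem1 := mem_iff_reach h01 hsnd1 hcl1
    have hmem2 := mem_iff_reach h02 hsnd2 hcl2
    have hperm : (bfs (PySem.Set.ofList (s0 :: rest)) (s0 :: rest).length [s0] [s0]).Perm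
        (saturate (s0 :: rest) (s0 :: rest).length [s0]) :=
      (List.perm_ext_iff_of_nodup hnd1 hnd2).mpr
        (fun p => (hmem1 p).trans (hmem2 p).symm)
    show ((bfs (PySem.Set.ofList (s0 :: rest)) (s0 :: rest).length [s0] [s0]).length ==
        (s0 :: rest).length) =
      ((saturate (s0 :: rest) (s0 :: rest).length [s0]).length == (s0 :: rest).length)
    rw [hperm.length_eq]

-- ===== VERDICT (by name: the statement is the Claim_ definition above) =====
theorem is_still_connected_after_move_spec : Claim_equal_is_still_connected_after_move := by
  intro state bi np _ _
  unfold Spec_is_still_connected_after_move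
  unfold is_still_connected_after_move is_still_connected_after_move_alt
  by_cases hlen : state.length ≤ 1
  · rw [if_pos hlen, if_pos hlen]
  · rw [if_neg hlen, if_neg hlen]
    cases hget : PySem.List.pyGet? state bi with
    | none => rfl
    | some orig =>
      have hdec : decide (1 < state.length) = true := by
        rw [decide_eq_true_eq]; omega
      have hany1 : (nbrs orig).any (PySem.Set.contains (PySem.Set.ofList state)) =
          DIRECTIONS.any (fun d =>
            PySem.Set.contains (PySem.Set.ofList state) (orig.1 + d.1, orig.2 + d.2)) := by
        simp only [nbrs, List.any_map]
        rfl
      have hany2 : (nbrs np).any (fun n =>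
            PySem.Set.contains (PySem.Set.ofList state) n && n != orig) =
          DIRECTIONS.any (fun d =>
            PySem.Set.contains (PySem.Set.ofList state) (np.1 + d.1, np.2 + d.2) &&
              ((np.1 + d.1, np.2 + d.2) != orig)) := by
        simp only [nbrs, List.any_map]
        rfl
      simp only [hdec, Bool.and_true, hany1, hany2, conn_eq]
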